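-- pv_equiv track=rewrite | github.com/philiptitus/HEX- | mpesa.py | categorize_details
-- ===== SOURCE A (Python) =====
-- def categorize_details(details):
--     details = str(details).lower()
--     if any(word in details for word in ["airtime", "tingg", "safaricom", "airtel", "bundles", "gessy"]):
--         return "Airtime"
--     elif any(word in details for word in ["kplc"]):
--         return "Power"
--     elif any(word in details for word in ["7629905"]):
--         return "Rent Payment"
--     elif any(word in details for word in ["cleanshelf", "equity", "kcb","naivas", "tuskys", "quick mart", "carrefour", "4093275","supermarket", "shopping", "small business", "mall","jumia", "kilimall", "amazon", "shop", "market", "merchant", "direct pay"]):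
--         return "Shopping"
--     elif any(word in details for word in ["baraka", "java", "hotel", "restaurant", "cafe"]):
--         return "Restaurant"
--     elif any(word in details for word in ["sacco", "uber"]):
--         return "Transport"
--     elif any(word in details for word in ["alpha", "water"]):
--         return "Water"
--     elif any(word in details for word in ["butchery", "meat", "butcher"]):
--         return "Butchery"
--     elif any(word in details for word in ["customer transfer"]):
--         return "People Transfer"
--     elif any(word in details for word in ["withdraw"]):
--         return "Withdrawals"
--     elif any(word in details for word in ["charge"]):
--         return "Transaction Charge"
--     elif any(word in details for word in ["pay bill"]):
--         return "Pay Bill"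
--     else:
--         return "Other"
-- ===== SOURCE B (Python) =====
-- # B: instead of testing every keyword against the string, enumerate every
-- # substring of d of length 1.._MAX (the longest keyword) and look it up in a
-- # keyword -> priority hash table, keeping the smallest priority seen; the
-- # priority indexes the label table.  Correct because a keyword w occurs in d
-- # iff some substring d[i:i+len(w)] equals w, and A returns the label of the
-- # smallest-priority category with an occurring keyword.
--
-- _LABELS = ["Airtime", "Power", "Rent Payment", "Shopping", "Restaurant",
--            "Transport", "Water", "Butchery", "People Transfer",
--            "Withdrawals", "Transaction Charge", "Pay Bill"]
--
-- _WORDLISTS = [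
--     ["airtime", "tingg", "safaricom", "airtel", "bundles", "gessy"],
--     ["kplc"],
--     ["7629905"],
--     ["cleanshelf", "equity", "kcb", "naivas", "tuskys", "quick mart",
--      "carrefour", "4093275", "supermarket", "shopping", "small business",
--      "mall", "jumia", "kilimall", "amazon", "shop", "market", "merchant",
--      "direct pay"],
--     ["baraka", "java", "hotel", "restaurant", "cafe"],
--     ["sacco", "uber"],
--     ["alpha", "water"],
--     ["butchery", "meat", "butcher"],
--     ["customer transfer"],
--     ["withdraw"],
--     ["charge"],
--     ["pay bill"],
-- ]
--
-- _KW = {w: p for p, words in enumerate(_WORDLISTS) for w in words}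
-- _MAX = max(map(len, _KW))
--
-- def categorize_details(details):
--     d = str(details).lower()
--     best = None
--     for i in range(len(d)):
--         for L in range(1, _MAX + 1):
--             p = _KW.get(d[i:i + L])
--             if p is not None and (best is None or p < best):
--                 best = p
--     return "Other" if best is None else _LABELS[best]
-- ===== Notes on version B (the rewrite author's own statement) =====
-- stated objective: alternative
-- what changed: Replaces per-keyword substring scans in an elif chain by enumerating all substrings of bounded length once and looking each up in a keyword->priority hash table, returning the label of the minimal priority found.
import Mathlib
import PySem

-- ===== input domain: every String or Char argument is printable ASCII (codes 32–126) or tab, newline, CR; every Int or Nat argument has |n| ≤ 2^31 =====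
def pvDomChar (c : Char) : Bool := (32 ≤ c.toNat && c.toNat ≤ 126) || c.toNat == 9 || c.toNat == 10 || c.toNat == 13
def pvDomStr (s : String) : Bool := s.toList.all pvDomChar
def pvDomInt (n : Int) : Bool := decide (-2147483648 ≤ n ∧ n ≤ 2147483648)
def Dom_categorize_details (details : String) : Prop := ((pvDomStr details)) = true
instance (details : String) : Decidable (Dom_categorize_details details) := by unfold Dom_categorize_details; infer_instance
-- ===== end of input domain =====

-- B replaces A's per-keyword substring scans (elif chain) by enumerating every substring of
-- bounded length once and looking it up in a keyword -> priority table, keeping the minimum.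

-- ===== PORT A =====
def categorize_details (details : String) : String :=
  let d := PySem.Str.lower details
  if (["airtime", "tingg", "safaricom", "airtel", "bundles", "gessy"].any (fun w => PySem.Str.isIn w d)) then "Airtime"
  else if (["kplc"].any (fun w => PySem.Str.isIn w d)) then "Power"
  else if (["7629905"].any (fun w => PySem.Str.isIn w d)) then "Rent Payment"
  else if (["cleanshelf", "equity", "kcb", "naivas", "tuskys", "quick mart", "carrefour", "4093275", "supermarket", "shopping", "small business", "mall", "jumia", "kilimall", "amazon", "shop", "market", "merchant", "direct pay"].any (fun w => PySem.Str.isIn w d)) then "Shopping"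
  else if (["baraka", "java", "hotel", "restaurant", "cafe"].any (fun w => PySem.Str.isIn w d)) then "Restaurant"
  else if (["sacco", "uber"].any (fun w => PySem.Str.isIn w d)) then "Transport"
  else if (["alpha", "water"].any (fun w => PySem.Str.isIn w d)) then "Water"
  else if (["butchery", "meat", "butcher"].any (fun w => PySem.Str.isIn w d)) then "Butchery"
  else if (["customer transfer"].any (fun w => PySem.Str.isIn w d)) then "People Transfer"
  else if (["withdraw"].any (fun w => PySem.Str.isIn w d)) then "Withdrawals"
  else if (["charge"].any (fun w => PySem.Str.isIn w d)) then "Transaction Charge"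
  else if (["pay bill"].any (fun w => PySem.Str.isIn w d)) then "Pay Bill"
  else "Other"

-- ===== PORT B =====
def pvLabels : List String := ["Airtime", "Power", "Rent Payment", "Shopping", "Restaurant", "Transport", "Water", "Butchery", "People Transfer", "Withdrawals", "Transaction Charge", "Pay Bill"]

def pvWordlists : List (List String) :=
  [["airtime", "tingg", "safaricom", "airtel", "bundles", "gessy"],
   ["kplc"],
   ["7629905"],
   ["cleanshelf", "equity", "kcb", "naivas", "tuskys", "quick mart", "carrefour", "4093275", "supermarket", "shopping", "small business", "mall", "jumia", "kilimall", "amazon", "shop", "market", "merchant", "direct pay"],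
   ["baraka", "java", "hotel", "restaurant", "cafe"],
   ["sacco", "uber"],
   ["alpha", "water"],
   ["butchery", "meat", "butcher"],
   ["customer transfer"],
   ["withdraw"],
   ["charge"],
   ["pay bill"]]

-- _KW = {w: p for p, words in enumerate(_WORDLISTS) for w in words}
def pvKw : PySem.Dict String Int :=
  (PySem.List.enumerate pvWordlists 0).foldl
    (fun dct pw => pw.2.foldl (fun dct w => dct.insert w pw.1) dct) PySem.Dict.empty

-- _MAX = max(map(len, _KW))  (exact: the keyword dict is nonempty, so Python's max returns)
def pvMax : Int := (PySem.List.max? (pvKw.keys.map (fun w => PySem.Str.len w)) (fun x => x)).getD 0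

def categorize_details_alt (details : String) : String :=
  let d := PySem.Str.lower details
  let best : Option Int :=
    (PySem.List.pyRange 0 (PySem.Str.len d) 1).foldl (fun best i =>
      (PySem.List.pyRange 1 (pvMax + 1) 1).foldl (fun best L =>
        match pvKw.get? (PySem.Str.slice d (some i) (some (i + L))) with
        | some p =>
          match best with
          | none => some p
          | some m => if p < m then some p else some m
        | none => best) best) none
  match best with
  | none => "Other"
  | some b => PySem.List.pyGetD pvLabels b ""  -- exact: b is a stored priority, always 0..11, in range

-- ===== PRECONDITION & SPEC =====
def Spec_categorize_details (details : String) (out : String) : Prop := out = categorize_details_alt details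
instance (details : String) (out : String) : Decidable (Spec_categorize_details details out) := by unfold Spec_categorize_details; infer_instance

-- ===== CLAIM (what is proved, stated in full; the proofs are below) =====
def Claim_equal_categorize_details : Prop := ∀ (details : String), Dom_categorize_details details → Spec_categorize_details details (categorize_details details)

-- ===== LEMMAS AND PROOFS =====
-- the keyword table as a flat (keyword, priority) list
def pvPairs : List (String × Int) := [("airtime", 0), ("tingg", 0), ("safaricom", 0), ("airtel", 0), ("bundles", 0), ("gessy", 0), ("kplc", 1), ("7629905", 2), ("cleanshelf", 3), ("equity", 3), ("kcb", 3), ("naivas", 3), ("tuskys", 3), ("quick mart", 3), ("carrefour", 3), ("4093275", 3), ("supermarket", 3), ("shopping", 3), ("small business", 3), ("mall", 3), ("jumia", 3), ("kilimall", 3), ("amazon", 3), ("shop", 3), ("market", 3), ("merchant", 3), ("direct pay", 3), ("baraka", 4), ("java", 4), ("hotel", 4), ("restaurant", 4), ("cafe", 4), ("sacco", 5), ("uber", 5), ("alpha", 6), ("water", 6), ("butchery", 7), ("meat", 7), ("butcher", 7), ("customer transfer", 8), ("withdraw", 9), ("charge", 10), ("pay bill", 11)]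

-- the body of B's inner loop as a named step function
def pvStep (b : Option Int) (s : String) : Option Int :=
  match pvKw.get? s with
  | some p =>
    match b with
    | none => some p
    | some m => if p < m then some p else some m
  | none => b

-- all substrings B inspects, and the priorities it finds
def pvCands (d : String) : List String :=
  (PySem.List.pyRange 0 (PySem.Str.len d) 1).flatMap (fun i =>
    (PySem.List.pyRange 1 18 1).map (fun L => PySem.Str.slice d (some i) (some (i + L))))

def pvHits (d : String) : List Int := (pvCands d).filterMap pvKw.get?

set_option maxRecDepth 8192 in
lemma pvKw_eq : pvKw = PySem.Dict.mk pvPairs := by decide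

set_option maxRecDepth 8192 in
lemma pvMax_eq : pvMax = 17 := by decide

set_option maxRecDepth 8192 in
lemma pvGet?_iff (s : String) (p : Int) : pvKw.get? s = some p ↔ (s, p) ∈ pvPairs := by
  rw [pvKw_eq]
  exact PySem.Dict.get?_eq_some_iff_mem_items _ s p (by decide)

set_option maxRecDepth 8192 in
lemma pvPairs_len : ∀ q ∈ pvPairs, 1 ≤ q.1.toList.length ∧ q.1.toList.length ≤ 17 := by decide

set_option maxRecDepth 8192 in
lemma pvPairs_val : ∀ q ∈ pvPairs, 0 ≤ q.2 ∧ q.2 ≤ 11 := by decide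

lemma pvMin?_toList (b : Option Int) : (b.toList).min? = b := by cases b <;> rfl

-- min? absorbs an inner min?
lemma pvMin?_toList_append (l1 l2 : List Int) :
    (l1.min?.toList ++ l2).min? = (l1 ++ l2).min? := by
  cases h : l1.min? with
  | none => rw [List.min?_eq_none_iff] at h; subst h; rfl
  | some m =>
    rcases List.min?_eq_some_iff.mp h with ⟨hm, hmin⟩
    cases h2 : ((m :: l2) : List Int).min? with
    | none => rw [List.min?_eq_none_iff] at h2; simp at h2
    | some r =>
      rcases List.min?_eq_some_iff.mp h2 with ⟨hr, hrmin⟩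
      show ((m :: l2) : List Int).min? = _
      rw [h2]
      symm
      rw [List.min?_eq_some_iff]
      constructor
      · rcases List.mem_cons.mp hr with rfl | hr2
        · exact List.mem_append.mpr (Or.inl hm)
        · exact List.mem_append.mpr (Or.inr hr2)
      · intro b hb
        rcases List.mem_append.mp hb with hb1 | hb2
        · exact le_trans (hrmin m (List.mem_cons_self ..)) (hmin b hb1)
        · exact hrmin b (List.mem_cons.mpr (Or.inr hb2))

-- one update of B's running minimum
lemma pvStep_eq (b : Option Int) (s : String) :
    pvStep b s = (b.toList ++ (pvKw.get? s).toList).min? := by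
  unfold pvStep
  cases b with
  | none => cases h : pvKw.get? s <;> simp
  | some m =>
    cases h : pvKw.get? s with
    | none => simp
    | some p =>
      show (if p < m then some p else some m) = ([m, p] : List Int).min?
      have h2 : ([m, p] : List Int).min? = some (min m p) := by simp [List.min?]
      rw [h2]
      split_ifs with hpm <;> simp [min_def] <;> omega

-- B's fold computes the minimum of all found priorities
set_option maxRecDepth 100000 in
set_option maxHeartbeats 2000000 in
lemma pvFold_eq (xs : List String) (b : Option Int) :
    xs.foldl pvStep b = (b.toList ++ xs.filterMap pvKw.get?).min? := by
  induction xs generalizing b with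
  | nil => simpa using (pvMin?_toList b).symm
  | cons x xs ih =>
    rw [List.foldl_cons, ih, List.filterMap_cons]
    cases h : pvKw.get? x with
    | none =>
      have hs : pvStep b x = b := by unfold pvStep; rw [h]
      rw [hs]
    | some p =>
      have hs : pvStep b x = (b.toList ++ [p]).min? := by rw [pvStep_eq, h]; rfl
      rw [hs, pvMin?_toList_append, List.append_assoc]
      rfl

-- B is the minimum over pvHits, rendered through the label table
set_option maxRecDepth 100000 in
set_option maxHeartbeats 2000000 in
lemma pvAlt_eq (details : String) :
    categorize_details_alt details =
      (match (pvHits (PySem.Str.lower details)).min? with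
       | none => "Other"
       | some b => PySem.List.pyGetD pvLabels b "") := by
  simp only [categorize_details_alt, pvMax_eq]
  have h18 : ((17 : Int) + 1) = 18 := by norm_num
  rw [h18]
  have h2 : ∀ (i : Int) (b : Option Int),
      (PySem.List.pyRange 1 18 1).foldl (fun best L =>
        match pvKw.get? (PySem.Str.slice (PySem.Str.lower details) (some i) (some (i + L))) with
        | some p =>
          match best with
          | none => some p
          | some m => if p < m then some p else some m
        | none => best) b
        = ((PySem.List.pyRange 1 18 1).map
            (fun L => PySem.Str.slice (PySem.Str.lower details) (some i) (some (i + L)))).foldl pvStep b := by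
    intro i b
    rw [List.foldl_map]
    rfl
  have h3 : (PySem.List.pyRange 0 (PySem.Str.len (PySem.Str.lower details)) 1).foldl (fun best i =>
      (PySem.List.pyRange 1 18 1).foldl (fun best L =>
        match pvKw.get? (PySem.Str.slice (PySem.Str.lower details) (some i) (some (i + L))) with
        | some p =>
          match best with
          | none => some p
          | some m => if p < m then some p else some m
        | none => best) best) none = (pvHits (PySem.Str.lower details)).min? := by
    have hfun : (fun (best : Option Int) (i : Int) =>
        (PySem.List.pyRange 1 18 1).foldl (fun best L =>
          match pvKw.get? (PySem.Str.slice (PySem.Str.lower details) (some i) (some (i + L))) with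
          | some p =>
            match best with
            | none => some p
            | some m => if p < m then some p else some m
          | none => best) best)
        = (fun (b : Option Int) (i : Int) =>
            ((PySem.List.pyRange 1 18 1).map
              (fun L => PySem.Str.slice (PySem.Str.lower details) (some i) (some (i + L)))).foldl pvStep b) := by
      funext b i
      exact h2 i b
    rw [hfun, ← List.foldl_flatMap, pvFold_eq]
    rfl
  rw [h3]

-- a priority is found iff one of its keywords occurs in d
lemma pvMem_hits_iff (d : String) (q : Int) :
    q ∈ pvHits d ↔ ∃ w, (w, q) ∈ pvPairs ∧ PySem.Str.isIn w d = true := by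
  unfold pvHits pvCands
  rw [List.mem_filterMap]
  constructor
  · rintro ⟨s, hs, hget⟩
    refine ⟨s, (pvGet?_iff s q).mp hget, ?_⟩
    rcases List.mem_flatMap.mp hs with ⟨i, hi, hsi⟩
    rcases List.mem_map.mp hsi with ⟨L, hL, rfl⟩
    rcases PySem.List.mem_pyRange_one.mp hi with ⟨hi0, hin⟩
    rcases PySem.List.mem_pyRange_one.mp hL with ⟨hL1, hL18⟩
    rw [PySem.Str.isIn_iff_infix, PySem.Str.toList_slice, PySem.Chars.slice_eq_listSlice]
    rw [PySem.List.slice_toNat _ hi0 (by omega)]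
    exact ((List.take_prefix _ _).isInfix).trans ((List.drop_suffix _ _).isInfix)
  · rintro ⟨w, hw, hin⟩
    have hlen := pvPairs_len _ hw
    have hw1 : 1 ≤ w.toList.length := hlen.1
    have hw2 : w.toList.length ≤ 17 := hlen.2
    rcases (PySem.Str.isIn_iff_infix w d).mp hin with ⟨pre, suf, hsplit⟩
    refine ⟨w, ?_, (pvGet?_iff w q).mpr hw⟩
    apply List.mem_flatMap.mpr
    have hd : d.toList.length = pre.length + w.toList.length + suf.length := by
      rw [← hsplit]; simp; omega
    refine ⟨(pre.length : Int), ?_, ?_⟩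
    · rw [PySem.List.mem_pyRange_one, PySem.Str.len_eq]
      constructor
      · positivity
      · omega
    · apply List.mem_map.mpr
      refine ⟨(w.toList.length : Int), ?_, ?_⟩
      · rw [PySem.List.mem_pyRange_one]
        omega
      · apply String.toList_inj.mp
        rw [PySem.Str.toList_slice, PySem.Chars.slice_eq_listSlice]
        rw [PySem.List.slice_natCast_add]
        rw [← hsplit, List.append_assoc, List.drop_left, List.take_left]


lemma pvHits_0 (d : String) :
    ((0 : Int) ∈ pvHits d) ↔ (["airtime", "tingg", "safaricom", "airtel", "bundles", "gessy"].any (fun w => PySem.Str.isIn w d)) = true := by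
  rw [pvMem_hits_iff]
  simp [pvPairs]

lemma pvHits_1 (d : String) :
    ((1 : Int) ∈ pvHits d) ↔ (["kplc"].any (fun w => PySem.Str.isIn w d)) = true := by
  rw [pvMem_hits_iff]
  simp [pvPairs]

lemma pvHits_2 (d : String) :
    ((2 : Int) ∈ pvHits d) ↔ (["7629905"].any (fun w => PySem.Str.isIn w d)) = true := by
  rw [pvMem_hits_iff]
  simp [pvPairs]

lemma pvHits_3 (d : String) :
    ((3 : Int) ∈ pvHits d) ↔ (["cleanshelf", "equity", "kcb", "naivas", "tuskys", "quick mart", "carrefour", "4093275", "supermarket", "shopping", "small business", "mall", "jumia", "kilimall", "amazon", "shop", "market", "merchant", "direct pay"].any (fun w => PySem.Str.isIn w d)) = true := by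
  rw [pvMem_hits_iff]
  simp [pvPairs]

lemma pvHits_4 (d : String) :
    ((4 : Int) ∈ pvHits d) ↔ (["baraka", "java", "hotel", "restaurant", "cafe"].any (fun w => PySem.Str.isIn w d)) = true := by
  rw [pvMem_hits_iff]
  simp [pvPairs]

lemma pvHits_5 (d : String) :
    ((5 : Int) ∈ pvHits d) ↔ (["sacco", "uber"].any (fun w => PySem.Str.isIn w d)) = true := by
  rw [pvMem_hits_iff]
  simp [pvPairs]

lemma pvHits_6 (d : String) :
    ((6 : Int) ∈ pvHits d) ↔ (["alpha", "water"].any (fun w => PySem.Str.isIn w d)) = true := by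
  rw [pvMem_hits_iff]
  simp [pvPairs]

lemma pvHits_7 (d : String) :
    ((7 : Int) ∈ pvHits d) ↔ (["butchery", "meat", "butcher"].any (fun w => PySem.Str.isIn w d)) = true := by
  rw [pvMem_hits_iff]
  simp [pvPairs]

lemma pvHits_8 (d : String) :
    ((8 : Int) ∈ pvHits d) ↔ (["customer transfer"].any (fun w => PySem.Str.isIn w d)) = true := by
  rw [pvMem_hits_iff]
  simp [pvPairs]

lemma pvHits_9 (d : String) :
    ((9 : Int) ∈ pvHits d) ↔ (["withdraw"].any (fun w => PySem.Str.isIn w d)) = true := by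
  rw [pvMem_hits_iff]
  simp [pvPairs]

lemma pvHits_10 (d : String) :
    ((10 : Int) ∈ pvHits d) ↔ (["charge"].any (fun w => PySem.Str.isIn w d)) = true := by
  rw [pvMem_hits_iff]
  simp [pvPairs]

lemma pvHits_11 (d : String) :
    ((11 : Int) ∈ pvHits d) ↔ (["pay bill"].any (fun w => PySem.Str.isIn w d)) = true := by
  rw [pvMem_hits_iff]
  simp [pvPairs]

-- ===== VERDICT (by name: the statement is the Claim_ definition above) =====
theorem categorize_details_spec : Claim_equal_categorize_details := by
  intro details _
  unfold Spec_categorize_details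
  rw [pvAlt_eq]
  simp only [categorize_details]
  generalize PySem.Str.lower details = d
  by_cases h0 : (["airtime", "tingg", "safaricom", "airtel", "bundles", "gessy"].any (fun w => PySem.Str.isIn w d)) = true
  · rw [if_pos h0]
    have hmin : (pvHits d).min? = some 0 := by
      rw [List.min?_eq_some_iff]
      refine ⟨(pvHits_0 d).mpr h0, ?_⟩
      intro b hb
      rcases (pvMem_hits_iff d b).mp hb with ⟨w, hw, _⟩
      have hv1 : (0 : Int) ≤ b := (pvPairs_val _ hw).1
      have hv2 : b ≤ 11 := (pvPairs_val _ hw).2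
      rcases (by omega : (0 : Int) ≤ b ∨ b < 0) with hge | hlt
      · exact hge
      · exfalso
        omega
    rw [hmin]
    decide
  · rw [if_neg h0]
    by_cases h1 : (["kplc"].any (fun w => PySem.Str.isIn w d)) = true
    · rw [if_pos h1]
      have hmin : (pvHits d).min? = some 1 := by
        rw [List.min?_eq_some_iff]
        refine ⟨(pvHits_1 d).mpr h1, ?_⟩
        intro b hb
        rcases (pvMem_hits_iff d b).mp hb with ⟨w, hw, _⟩
        have hv1 : (0 : Int) ≤ b := (pvPairs_val _ hw).1
        have hv2 : b ≤ 11 := (pvPairs_val _ hw).2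
        rcases (by omega : (1 : Int) ≤ b ∨ b < 1) with hge | hlt
        · exact hge
        · exfalso
          interval_cases b
          · exact h0 ((pvHits_0 d).mp hb)
      rw [hmin]
      decide
    · rw [if_neg h1]
      by_cases h2 : (["7629905"].any (fun w => PySem.Str.isIn w d)) = true
      · rw [if_pos h2]
        have hmin : (pvHits d).min? = some 2 := by
          rw [List.min?_eq_some_iff]
          refine ⟨(pvHits_2 d).mpr h2, ?_⟩
          intro b hb
          rcases (pvMem_hits_iff d b).mp hb with ⟨w, hw, _⟩
          have hv1 : (0 : Int) ≤ b := (pvPairs_val _ hw).1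
          have hv2 : b ≤ 11 := (pvPairs_val _ hw).2
          rcases (by omega : (2 : Int) ≤ b ∨ b < 2) with hge | hlt
          · exact hge
          · exfalso
            interval_cases b
            · exact h0 ((pvHits_0 d).mp hb)
            · exact h1 ((pvHits_1 d).mp hb)
        rw [hmin]
        decide
      · rw [if_neg h2]
        by_cases h3 : (["cleanshelf", "equity", "kcb", "naivas", "tuskys", "quick mart", "carrefour", "4093275", "supermarket", "shopping", "small business", "mall", "jumia", "kilimall", "amazon", "shop", "market", "merchant", "direct pay"].any (fun w => PySem.Str.isIn w d)) = true
        · rw [if_pos h3]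
          have hmin : (pvHits d).min? = some 3 := by
            rw [List.min?_eq_some_iff]
            refine ⟨(pvHits_3 d).mpr h3, ?_⟩
            intro b hb
            rcases (pvMem_hits_iff d b).mp hb with ⟨w, hw, _⟩
            have hv1 : (0 : Int) ≤ b := (pvPairs_val _ hw).1
            have hv2 : b ≤ 11 := (pvPairs_val _ hw).2
            rcases (by omega : (3 : Int) ≤ b ∨ b < 3) with hge | hlt
            · exact hge
            · exfalso
              interval_cases b
              · exact h0 ((pvHits_0 d).mp hb)
              · exact h1 ((pvHits_1 d).mp hb)
              · exact h2 ((pvHits_2 d).mp hb)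
          rw [hmin]
          decide
        · rw [if_neg h3]
          by_cases h4 : (["baraka", "java", "hotel", "restaurant", "cafe"].any (fun w => PySem.Str.isIn w d)) = true
          · rw [if_pos h4]
            have hmin : (pvHits d).min? = some 4 := by
              rw [List.min?_eq_some_iff]
              refine ⟨(pvHits_4 d).mpr h4, ?_⟩
              intro b hb
              rcases (pvMem_hits_iff d b).mp hb with ⟨w, hw, _⟩
              have hv1 : (0 : Int) ≤ b := (pvPairs_val _ hw).1
              have hv2 : b ≤ 11 := (pvPairs_val _ hw).2
              rcases (by omega : (4 : Int) ≤ b ∨ b < 4) with hge | hlt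
              · exact hge
              · exfalso
                interval_cases b
                · exact h0 ((pvHits_0 d).mp hb)
                · exact h1 ((pvHits_1 d).mp hb)
                · exact h2 ((pvHits_2 d).mp hb)
                · exact h3 ((pvHits_3 d).mp hb)
            rw [hmin]
            decide
          · rw [if_neg h4]
            by_cases h5 : (["sacco", "uber"].any (fun w => PySem.Str.isIn w d)) = true
            · rw [if_pos h5]
              have hmin : (pvHits d).min? = some 5 := by
                rw [List.min?_eq_some_iff]
                refine ⟨(pvHits_5 d).mpr h5, ?_⟩
                intro b hb
                rcases (pvMem_hits_iff d b).mp hb with ⟨w, hw, _⟩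
                have hv1 : (0 : Int) ≤ b := (pvPairs_val _ hw).1
                have hv2 : b ≤ 11 := (pvPairs_val _ hw).2
                rcases (by omega : (5 : Int) ≤ b ∨ b < 5) with hge | hlt
                · exact hge
                · exfalso
                  interval_cases b
                  · exact h0 ((pvHits_0 d).mp hb)
                  · exact h1 ((pvHits_1 d).mp hb)
                  · exact h2 ((pvHits_2 d).mp hb)
                  · exact h3 ((pvHits_3 d).mp hb)
                  · exact h4 ((pvHits_4 d).mp hb)
              rw [hmin]
              decide
            · rw [if_neg h5]
              by_cases h6 : (["alpha", "water"].any (fun w => PySem.Str.isIn w d)) = true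
              · rw [if_pos h6]
                have hmin : (pvHits d).min? = some 6 := by
                  rw [List.min?_eq_some_iff]
                  refine ⟨(pvHits_6 d).mpr h6, ?_⟩
                  intro b hb
                  rcases (pvMem_hits_iff d b).mp hb with ⟨w, hw, _⟩
                  have hv1 : (0 : Int) ≤ b := (pvPairs_val _ hw).1
                  have hv2 : b ≤ 11 := (pvPairs_val _ hw).2
                  rcases (by omega : (6 : Int) ≤ b ∨ b < 6) with hge | hlt
                  · exact hge
                  · exfalso
                    interval_cases b
                    · exact h0 ((pvHits_0 d).mp hb)
                    · exact h1 ((pvHits_1 d).mp hb)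
                    · exact h2 ((pvHits_2 d).mp hb)
                    · exact h3 ((pvHits_3 d).mp hb)
                    · exact h4 ((pvHits_4 d).mp hb)
                    · exact h5 ((pvHits_5 d).mp hb)
                rw [hmin]
                decide
              · rw [if_neg h6]
                by_cases h7 : (["butchery", "meat", "butcher"].any (fun w => PySem.Str.isIn w d)) = true
                · rw [if_pos h7]
                  have hmin : (pvHits d).min? = some 7 := by
                    rw [List.min?_eq_some_iff]
                    refine ⟨(pvHits_7 d).mpr h7, ?_⟩
                    intro b hb
                    rcases (pvMem_hits_iff d b).mp hb with ⟨w, hw, _⟩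
                    have hv1 : (0 : Int) ≤ b := (pvPairs_val _ hw).1
                    have hv2 : b ≤ 11 := (pvPairs_val _ hw).2
                    rcases (by omega : (7 : Int) ≤ b ∨ b < 7) with hge | hlt
                    · exact hge
                    · exfalso
                      interval_cases b
                      · exact h0 ((pvHits_0 d).mp hb)
                      · exact h1 ((pvHits_1 d).mp hb)
                      · exact h2 ((pvHits_2 d).mp hb)
                      · exact h3 ((pvHits_3 d).mp hb)
                      · exact h4 ((pvHits_4 d).mp hb)
                      · exact h5 ((pvHits_5 d).mp hb)
                      · exact h6 ((pvHits_6 d).mp hb)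
                  rw [hmin]
                  decide
                · rw [if_neg h7]
                  by_cases h8 : (["customer transfer"].any (fun w => PySem.Str.isIn w d)) = true
                  · rw [if_pos h8]
                    have hmin : (pvHits d).min? = some 8 := by
                      rw [List.min?_eq_some_iff]
                      refine ⟨(pvHits_8 d).mpr h8, ?_⟩
                      intro b hb
                      rcases (pvMem_hits_iff d b).mp hb with ⟨w, hw, _⟩
                      have hv1 : (0 : Int) ≤ b := (pvPairs_val _ hw).1
                      have hv2 : b ≤ 11 := (pvPairs_val _ hw).2
                      rcases (by omega : (8 : Int) ≤ b ∨ b < 8) with hge | hlt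
                      · exact hge
                      · exfalso
                        interval_cases b
                        · exact h0 ((pvHits_0 d).mp hb)
                        · exact h1 ((pvHits_1 d).mp hb)
                        · exact h2 ((pvHits_2 d).mp hb)
                        · exact h3 ((pvHits_3 d).mp hb)
                        · exact h4 ((pvHits_4 d).mp hb)
                        · exact h5 ((pvHits_5 d).mp hb)
                        · exact h6 ((pvHits_6 d).mp hb)
                        · exact h7 ((pvHits_7 d).mp hb)
                    rw [hmin]
                    decide
                  · rw [if_neg h8]
                    by_cases h9 : (["withdraw"].any (fun w => PySem.Str.isIn w d)) = true
                    · rw [if_pos h9]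
                      have hmin : (pvHits d).min? = some 9 := by
                        rw [List.min?_eq_some_iff]
                        refine ⟨(pvHits_9 d).mpr h9, ?_⟩
                        intro b hb
                        rcases (pvMem_hits_iff d b).mp hb with ⟨w, hw, _⟩
                        have hv1 : (0 : Int) ≤ b := (pvPairs_val _ hw).1
                        have hv2 : b ≤ 11 := (pvPairs_val _ hw).2
                        rcases (by omega : (9 : Int) ≤ b ∨ b < 9) with hge | hlt
                        · exact hge
                        · exfalso
                          interval_cases b
                          · exact h0 ((pvHits_0 d).mp hb)
                          · exact h1 ((pvHits_1 d).mp hb)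
                          · exact h2 ((pvHits_2 d).mp hb)
                          · exact h3 ((pvHits_3 d).mp hb)
                          · exact h4 ((pvHits_4 d).mp hb)
                          · exact h5 ((pvHits_5 d).mp hb)
                          · exact h6 ((pvHits_6 d).mp hb)
                          · exact h7 ((pvHits_7 d).mp hb)
                          · exact h8 ((pvHits_8 d).mp hb)
                      rw [hmin]
                      decide
                    · rw [if_neg h9]
                      by_cases h10 : (["charge"].any (fun w => PySem.Str.isIn w d)) = true
                      · rw [if_pos h10]
                        have hmin : (pvHits d).min? = some 10 := by
                          rw [List.min?_eq_some_iff]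
                          refine ⟨(pvHits_10 d).mpr h10, ?_⟩
                          intro b hb
                          rcases (pvMem_hits_iff d b).mp hb with ⟨w, hw, _⟩
                          have hv1 : (0 : Int) ≤ b := (pvPairs_val _ hw).1
                          have hv2 : b ≤ 11 := (pvPairs_val _ hw).2
                          rcases (by omega : (10 : Int) ≤ b ∨ b < 10) with hge | hlt
                          · exact hge
                          · exfalso
                            interval_cases b
                            · exact h0 ((pvHits_0 d).mp hb)
                            · exact h1 ((pvHits_1 d).mp hb)
                            · exact h2 ((pvHits_2 d).mp hb)
                            · exact h3 ((pvHits_3 d).mp hb)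
                            · exact h4 ((pvHits_4 d).mp hb)
                            · exact h5 ((pvHits_5 d).mp hb)
                            · exact h6 ((pvHits_6 d).mp hb)
                            · exact h7 ((pvHits_7 d).mp hb)
                            · exact h8 ((pvHits_8 d).mp hb)
                            · exact h9 ((pvHits_9 d).mp hb)
                        rw [hmin]
                        decide
                      · rw [if_neg h10]
                        by_cases h11 : (["pay bill"].any (fun w => PySem.Str.isIn w d)) = true
                        · rw [if_pos h11]
                          have hmin : (pvHits d).min? = some 11 := by
                            rw [List.min?_eq_some_iff]
                            refine ⟨(pvHits_11 d).mpr h11, ?_⟩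
                            intro b hb
                            rcases (pvMem_hits_iff d b).mp hb with ⟨w, hw, _⟩
                            have hv1 : (0 : Int) ≤ b := (pvPairs_val _ hw).1
                            have hv2 : b ≤ 11 := (pvPairs_val _ hw).2
                            rcases (by omega : (11 : Int) ≤ b ∨ b < 11) with hge | hlt
                            · exact hge
                            · exfalso
                              interval_cases b
                              · exact h0 ((pvHits_0 d).mp hb)
                              · exact h1 ((pvHits_1 d).mp hb)
                              · exact h2 ((pvHits_2 d).mp hb)
                              · exact h3 ((pvHits_3 d).mp hb)
                              · exact h4 ((pvHits_4 d).mp hb)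
                              · exact h5 ((pvHits_5 d).mp hb)
                              · exact h6 ((pvHits_6 d).mp hb)
                              · exact h7 ((pvHits_7 d).mp hb)
                              · exact h8 ((pvHits_8 d).mp hb)
                              · exact h9 ((pvHits_9 d).mp hb)
                              · exact h10 ((pvHits_10 d).mp hb)
                          rw [hmin]
                          decide
                        · rw [if_neg h11]
                          have hnil : pvHits d = [] := by
                            rcases hh : pvHits d with _ | ⟨q, t⟩
                            · rfl
                            · exfalso
                              have hq : q ∈ pvHits d := by rw [hh]; exact List.mem_cons_self ..
                              rcases (pvMem_hits_iff d q).mp hq with ⟨w, hw, _⟩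
                              have hv1 : (0 : Int) ≤ q := (pvPairs_val _ hw).1
                              have hv2 : q ≤ 11 := (pvPairs_val _ hw).2
                              interval_cases q
                              · exact h0 ((pvHits_0 d).mp hq)
                              · exact h1 ((pvHits_1 d).mp hq)
                              · exact h2 ((pvHits_2 d).mp hq)
                              · exact h3 ((pvHits_3 d).mp hq)
                              · exact h4 ((pvHits_4 d).mp hq)
                              · exact h5 ((pvHits_5 d).mp hq)
                              · exact h6 ((pvHits_6 d).mp hq)
                              · exact h7 ((pvHits_7 d).mp hq)
                              · exact h8 ((pvHits_8 d).mp hq)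
                              · exact h9 ((pvHits_9 d).mp hq)
                              · exact h10 ((pvHits_10 d).mp hq)
                              · exact h11 ((pvHits_11 d).mp hq)
                          rw [hnil]
                          rfl
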